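-- pv_equiv track=rewrite | github.com/sovyx-ai/sovyx | scripts/update_log_noise_baseline.py | _count_by_event_logger
-- ===== SOURCE A (Python) =====
-- from collections import Counter
-- from typing import Any
--
-- def _count_by_event_logger(entries: list[dict[str, Any]]) -> dict[str, int]:
--     """Return ``{"event|logger": count}`` ordered for stable diffs."""
--     counter: Counter[tuple[str, str]] = Counter()
--     for entry in entries:
--         event = str(entry.get("event", ""))
--         logger = str(entry.get("logger", ""))
--         if not event:
--             continue
--         counter[(event, logger)] += 1
--     return {f"{event}|{logger}": count for (event, logger), count in sorted(counter.items())}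
-- ===== SOURCE B (Python) =====
-- def _count_by_event_logger(entries):
--     """Return ``{"event|logger": count}`` ordered for stable diffs."""
--     keys = sorted(
--         (event, str(entry.get("logger", "")))
--         for entry in entries
--         for event in (str(entry.get("event", "")),)
--         if event
--     )
--     result = {}
--     i, n = 0, len(keys)
--     while i < n:
--         j = i + 1
--         while j < n and keys[j] == keys[i]:
--             j += 1
--         event, logger = keys[i]
--         result[f"{event}|{logger}"] = j - i
--         i = j
--     return result
-- ===== Notes on version B (the rewrite author's own statement) =====
-- stated objective: alternative
-- what changed: B replaces A's Counter-dict pass followed by sorting the counted items with a sort of the raw filtered (event, logger) key list followed by a single run-length scan over equal adjacent keys; no counting dict is ever built.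
import Mathlib
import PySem

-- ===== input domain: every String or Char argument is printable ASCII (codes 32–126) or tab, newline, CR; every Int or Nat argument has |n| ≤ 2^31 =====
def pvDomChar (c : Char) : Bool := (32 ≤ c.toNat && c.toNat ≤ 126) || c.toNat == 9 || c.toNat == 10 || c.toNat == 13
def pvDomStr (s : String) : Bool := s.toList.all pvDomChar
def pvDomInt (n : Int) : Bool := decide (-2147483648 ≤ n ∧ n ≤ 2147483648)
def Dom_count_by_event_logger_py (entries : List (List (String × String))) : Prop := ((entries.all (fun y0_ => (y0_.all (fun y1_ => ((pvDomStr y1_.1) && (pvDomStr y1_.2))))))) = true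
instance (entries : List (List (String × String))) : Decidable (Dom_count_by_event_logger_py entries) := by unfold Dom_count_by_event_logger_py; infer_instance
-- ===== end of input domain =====

-- B replaces A's Counter-then-sort-items with sort-the-filtered-keys-then-run-length-scan;
-- objective: alternative algorithm of similar cost (no speed claim).


-- ===== PORT A =====
-- Port of A: a Counter keyed by (event, logger) built in one pass (skipping empty
-- events), then sorted items formatted as "event|logger".  Python's tuple
-- comparison in sorted() is lexicographic; it is ported exactly via the Lex key.
def count_by_event_logger_py (entries : List (List (String × String))) : List (String × Int) :=
  let counter : PySem.Dict (String × String) Int :=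
    entries.foldl (fun c entry =>
      let event := (PySem.Dict.mk entry).getD "event" ""
      let logger := (PySem.Dict.mk entry).getD "logger" ""
      if event = "" then c
      else c.modify (event, logger) 0 (· + 1)) PySem.Dict.empty
  (PySem.List.sorted counter.items (fun p => toLex (toLex p.1, p.2)) false).map
    (fun p => (p.1.1 ++ "|" ++ p.1.2, p.2))

-- ===== PORT B =====
-- B-side helper: the run-length scan over the sorted key list (Source B's while loops).
def pvRuns : List (String × String) → List ((String × String) × Int)
  | [] => []
  | k :: rest =>
    (k, ((rest.takeWhile (fun x => x == k)).length : Int) + 1) ::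
      pvRuns (rest.dropWhile (fun x => x == k))
termination_by l => l.length
decreasing_by
  simpa using Nat.lt_succ_of_le (List.length_dropWhile_le (fun x => x == k) rest)

-- Port of B: collect the (event, logger) keys of entries with non-empty event,
-- sort them (Python tuple sort = sorted2 on the two components), then emit one
-- output pair per run of equal keys, counting the run length.
def count_by_event_logger_py_alt (entries : List (List (String × String))) : List (String × Int) :=
  let keys :=
    PySem.List.sorted2
      (entries.filterMap (fun entry =>
        let event := (PySem.Dict.mk entry).getD "event" ""
        let logger := (PySem.Dict.mk entry).getD "logger" ""
        if event = "" then none else some (event, logger)))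
      Prod.fst Prod.snd false
  (pvRuns keys).map (fun p => (p.1.1 ++ "|" ++ p.1.2, p.2))

-- ===== PRECONDITION & SPEC =====
def Spec_count_by_event_logger_py (entries : List (List (String × String))) (out : List (String × Int)) : Prop := out = count_by_event_logger_py_alt entries
instance (entries : List (List (String × String))) (out : List (String × Int)) : Decidable (Spec_count_by_event_logger_py entries out) := by unfold Spec_count_by_event_logger_py; infer_instance

-- ===== CLAIM (what is proved, stated in full; the proofs are below) =====
def Claim_equal_count_by_event_logger_py : Prop := ∀ (entries : List (List (String × String))), Dom_count_by_event_logger_py entries → Spec_count_by_event_logger_py entries (count_by_event_logger_py entries)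

-- ===== LEMMAS AND PROOFS =====

-- The key extracted from one entry (shared shape of both ports' per-entry work).
def pvEf (entry : List (String × String)) : Option (String × String) :=
  let event := (PySem.Dict.mk entry).getD "event" ""
  let logger := (PySem.Dict.mk entry).getD "logger" ""
  if event = "" then none else some (event, logger)

-- A's counting loop with its in-loop skip is the Counter of the filtered key list.
lemma pv_foldA (entries : List (List (String × String))) (c : PySem.Dict (String × String) Int) :
    entries.foldl (fun c entry =>
      let event := (PySem.Dict.mk entry).getD "event" ""
      let logger := (PySem.Dict.mk entry).getD "logger" ""
      if event = "" then c
      else c.modify (event, logger) 0 (· + 1)) c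
    = (entries.filterMap pvEf).foldl (fun d x => d.modify x 0 (· + 1)) c := by
  induction entries generalizing c with
  | nil => rfl
  | cons e es ih =>
    simp only [List.foldl_cons, List.filterMap_cons]
    by_cases h : (PySem.Dict.mk e).getD "event" "" = ""
    · have hpe : pvEf e = none := by simp [pvEf, h]
      rw [hpe]; simp [h, ih]
    · have hpe : pvEf e = some ((PySem.Dict.mk e).getD "event" "",
          (PySem.Dict.mk e).getD "logger" "") := by simp [pvEf, h]
      rw [hpe]; simp [h, ih]

-- Python's 2-tuple sort is the sort by the lexicographic key.
lemma pv_sorted2_eq (xs : List (String × String)) :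
    PySem.List.sorted2 xs Prod.fst Prod.snd false
      = PySem.List.sorted xs (fun k => toLex k) false := by
  have hb : (fun (a b : String × String) =>
        (decide (a.1 < b.1) || (!decide (b.1 < a.1) && decide (a.2 < b.2))))
      = fun a b => decide (toLex a < toLex b) := by
    funext a b
    have hiff : (toLex a < toLex b) ↔ (a.1 < b.1 ∨ (¬ b.1 < a.1 ∧ a.2 < b.2)) := by
      rw [Prod.Lex.toLex_lt_toLex]
      constructor
      · rintro (h | ⟨he, h2⟩)
        · exact Or.inl h
        · exact Or.inr ⟨by rw [he]; exact lt_irrefl _, h2⟩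
      · rintro (h | ⟨hn, h2⟩)
        · exact Or.inl h
        · rcases lt_trichotomy a.1 b.1 with h1 | h1 | h1
          · exact Or.inl h1
          · exact Or.inr ⟨h1, h2⟩
          · exact absurd h1 hn
    rw [show (decide (a.1 < b.1) || (!decide (b.1 < a.1) && decide (a.2 < b.2)))
          = decide (a.1 < b.1 ∨ (¬ b.1 < a.1 ∧ a.2 < b.2)) from by
        simp only [Bool.decide_or, Bool.decide_and, decide_not]]
    exact decide_eq_decide.mpr hiff.symm
  simp only [PySem.List.sorted2, PySem.List.sorted, if_neg (by simp : ¬(false = true))]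
  rw [hb]

-- After the head's run of equal keys is dropped, the head key is gone for good
-- (equal keys are contiguous in a sorted list).
lemma pv_not_mem_drop (k : String × String) (rest : List (String × String))
    (hp : (k :: rest).Pairwise (fun a b => toLex a ≤ toLex b)) :
    k ∉ rest.dropWhile (fun x => x == k) := by
  intro hk
  obtain ⟨hall, hrest⟩ := List.pairwise_cons.mp hp
  cases hdc : rest.dropWhile (fun x => x == k) with
  | nil => rw [hdc] at hk; exact absurd hk (List.not_mem_nil)
  | cons h d' =>
    have hhk : (h == k) = false := by
      have h2 := List.head_dropWhile_not (fun x => x == k) (l := rest) (by simp [hdc])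
      simpa [List.head_eq_iff_head?_eq_some, hdc] using h2
    have hhne : h ≠ k := by intro he; rw [he] at hhk; simp at hhk
    have hdpw : (h :: d').Pairwise (fun a b => toLex a ≤ toLex b) := by
      rw [← hdc]; exact hrest.sublist (List.dropWhile_sublist _)
    have hhmem : h ∈ rest :=
      (List.dropWhile_sublist (fun x => x == k)).subset (by rw [hdc]; exact List.mem_cons_self)
    rw [hdc] at hk
    rcases List.mem_cons.mp hk with he | hk'
    · exact hhne he.symm
    · have h1 : toLex h ≤ toLex k := (List.pairwise_cons.mp hdpw).1 k hk'
      have h2 : toLex k ≤ toLex h := hall h hhmem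
      have : h = k := by
        have he := le_antisymm h1 h2
        exact Prod.ext (congrArg Prod.fst he) (congrArg Prod.snd he)
      exact hhne this

-- Membership in pvRuns of a sorted list: one pair per occurring key, with its count.
lemma pv_runs_mem : ∀ (S : List (String × String)),
    S.Pairwise (fun a b => toLex a ≤ toLex b) → ∀ (p : (String × String) × Int),
    p ∈ pvRuns S ↔ p.1 ∈ S ∧ p.2 = (S.count p.1 : Int) := by
  intro S
  induction S using pvRuns.induct with
  | case1 => intro _ p; simp [pvRuns]
  | case2 k rest ih =>
    intro hp p
    obtain ⟨hall, hrest⟩ := List.pairwise_cons.mp hp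
    have hsplit : rest.takeWhile (fun x => x == k) ++ rest.dropWhile (fun x => x == k)
        = rest := List.takeWhile_append_dropWhile
    have htk : ∀ x ∈ rest.takeWhile (fun x => x == k), x = k :=
      fun x hx => eq_of_beq (List.mem_takeWhile_imp (p := fun x => x == k) hx)
    have hknd : k ∉ rest.dropWhile (fun x => x == k) := pv_not_mem_drop k rest hp
    have hdp : (rest.dropWhile (fun x => x == k)).Pairwise (fun a b => toLex a ≤ toLex b) :=
      hrest.sublist (List.dropWhile_sublist _)
    have hct : (rest.takeWhile (fun x => x == k)).count k
        = (rest.takeWhile (fun x => x == k)).length :=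
      List.count_eq_length.mpr (fun b hb => (htk b hb).symm)
    have hcount_k : (k :: rest).count k = (rest.takeWhile (fun x => x == k)).length + 1 := by
      have h1 : rest.count k = (rest.takeWhile (fun x => x == k)).length := by
        conv_lhs => rw [← hsplit]
        rw [List.count_append, hct, List.count_eq_zero.mpr hknd]
        omega
      rw [List.count_cons_self, h1]
    have hcount_ne : ∀ q : String × String, q ≠ k →
        (k :: rest).count q = (rest.dropWhile (fun x => x == k)).count q := by
      intro q hq
      have h1 : rest.count q = (rest.dropWhile (fun x => x == k)).count q := by
        conv_lhs => rw [← hsplit]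
        rw [List.count_append, List.count_eq_zero.mpr (fun hmem => hq (htk q hmem))]
        omega
      rw [List.count_cons_of_ne (Ne.symm hq), h1]
    rw [pvRuns]
    rw [List.mem_cons, ih hdp p]
    constructor
    · rintro (rfl | ⟨hmem, hcnt⟩)
      · exact ⟨List.mem_cons_self, by rw [hcount_k]; push_cast; ring⟩
      · have hne : p.1 ≠ k := fun he => hknd (he ▸ hmem)
        refine ⟨List.mem_cons_of_mem _
          ((List.dropWhile_sublist (fun x => x == k)).subset hmem), ?_⟩
        rw [hcount_ne p.1 hne, hcnt]
    · rintro ⟨hmem, hcnt⟩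
      by_cases hpk : p.1 = k
      · left
        rw [hpk, hcount_k] at hcnt
        refine Prod.ext hpk ?_
        rw [hcnt]; push_cast; ring
      · right
        refine ⟨?_, by rw [← hcount_ne p.1 hpk]; exact hcnt⟩
        rcases List.mem_cons.mp hmem with he | hm
        · exact absurd he hpk
        · rw [← hsplit] at hm
          rcases List.mem_append.mp hm with hm | hm
          · exact absurd (htk p.1 hm) hpk
          · exact hm

-- The keys emitted by pvRuns on a sorted list are strictly increasing.
lemma pv_runs_pairwise : ∀ (S : List (String × String)),
    S.Pairwise (fun a b => toLex a ≤ toLex b) →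
    (pvRuns S).Pairwise (fun a b => toLex a.1 < toLex b.1) := by
  intro S
  induction S using pvRuns.induct with
  | case1 => intro _; simp [pvRuns]
  | case2 k rest ih =>
    intro hp
    obtain ⟨hall, hrest⟩ := List.pairwise_cons.mp hp
    have hknd : k ∉ rest.dropWhile (fun x => x == k) := pv_not_mem_drop k rest hp
    have hdp : (rest.dropWhile (fun x => x == k)).Pairwise (fun a b => toLex a ≤ toLex b) :=
      hrest.sublist (List.dropWhile_sublist _)
    rw [pvRuns, List.pairwise_cons]
    refine ⟨?_, ih hdp⟩
    intro q hq
    have hqm : q.1 ∈ rest.dropWhile (fun x => x == k) :=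
      ((pv_runs_mem _ hdp q).mp hq).1
    have hle : toLex k ≤ toLex q.1 :=
      hall q.1 ((List.dropWhile_sublist (fun x => x == k)).subset hqm)
    refine lt_of_le_of_ne hle (fun he => ?_)
    have he' : toLex k = toLex q.1 := he
    have hkq : k = q.1 := Prod.ext (congrArg Prod.fst he') (congrArg Prod.snd he')
    exact hknd (hkq.symm ▸ hqm)

-- ===== VERDICT (by name: the statement is the Claim_ definition above) =====
theorem count_by_event_logger_py_spec : Claim_equal_count_by_event_logger_py := by
  intro entries _
  show count_by_event_logger_py entries = count_by_event_logger_py_alt entries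
  have hef : (fun entry : List (String × String) =>
      let event := (PySem.Dict.mk entry).getD "event" ""
      let logger := (PySem.Dict.mk entry).getD "logger" ""
      if event = "" then none else some (event, logger)) = pvEf := rfl
  unfold count_by_event_logger_py count_by_event_logger_py_alt
  simp only [pv_sorted2_eq, hef]
  rw [pv_foldA, ← PySem.Dict.counter_eq_foldl]
  set ks := entries.filterMap pvEf with hks
  set S := PySem.List.sorted ks (fun k => toLex k) false with hS
  have hpS : S.Pairwise (fun a b => toLex a ≤ toLex b) :=
    PySem.List.sorted_pairwise ks (fun k => toLex k)
  have hSk : S.Perm ks := PySem.List.sorted_perm ks (fun k => toLex k) false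
  have hnr : (pvRuns S).Nodup :=
    ((pv_runs_pairwise S hpS).imp (fun h => by rintro rfl; exact lt_irrefl _ h))
  have hsorted :
      PySem.List.sorted (PySem.Dict.counter ks).items
        (fun p => toLex (toLex p.1, p.2)) false = pvRuns S := by
    apply PySem.List.sorted_eq_of_perm_of_pairwise_lt
    · rw [PySem.Dict.items_counter]
      refine (List.perm_ext_iff_of_nodup hnr ?_).mpr ?_
      · exact (PySem.Set.nodup_ofList ks).map (fun a b h => congrArg Prod.fst h)
      · intro p
        rw [pv_runs_mem S hpS p]
        simp only [List.mem_map, PySem.Set.mem_ofList]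
        constructor
        · rintro ⟨hmem, hcnt⟩
          exact ⟨p.1, hSk.mem_iff.mp hmem, by
            rw [← hSk.count_eq p.1] at *; exact Prod.ext rfl hcnt.symm⟩
        · rintro ⟨k, hk, rfl⟩
          exact ⟨hSk.mem_iff.mpr hk, by rw [hSk.count_eq]⟩
    · exact (pv_runs_pairwise S hpS).imp
        (fun h => Prod.Lex.toLex_lt_toLex.mpr (Or.inl h))
  simp only [hsorted]
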